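-- pv_equiv track=rewrite | github.com/eatingallday/graphRAG | agents/icc_bridge.py | _sjtype
-- ===== SOURCE A (Python) =====
-- _SMALI_TO_JAVA_ICC = {
--     "V": "void", "Z": "boolean", "B": "byte", "C": "char",
--     "S": "short", "I": "int", "J": "long", "F": "float", "D": "double",
-- }
--
-- def _sjtype(t: str) -> str:
--     """Smali type → Java type (icc_bridge internal use)."""
--     if t in _SMALI_TO_JAVA_ICC:
--         return _SMALI_TO_JAVA_ICC[t]
--     if t.startswith("["):
--         return _sjtype(t[1:]) + "[]"
--     if t.startswith("L") and t.endswith(";"):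
--         return t[1:-1].replace("/", ".")
--     return t
-- ===== SOURCE B (Python) =====
-- _SMALI_TO_JAVA_ICC = {
--     "V": "void", "Z": "boolean", "B": "byte", "C": "char",
--     "S": "short", "I": "int", "J": "long", "F": "float", "D": "double",
-- }
--
-- def _sjtype(t: str) -> str:
--     """Smali type -> Java type: strip leading '[' iteratively, convert the base once."""
--     n = len(t) - len(t.lstrip("["))
--     base = t[n:]
--     java = _SMALI_TO_JAVA_ICC.get(base)
--     if java is None:
--         if base.startswith("L") and base.endswith(";"):
--             java = base[1:-1].replace("/", ".")
--         else:
--             java = base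
--     return java + "[]" * n
-- ===== Notes on version B (the rewrite author's own statement) =====
-- stated objective: alternative
-- what changed: Replaces the recursive per-bracket descent with an iterative version: count leading '[' once with lstrip, convert the stripped base type once, then append '[]' per counted bracket.
import Mathlib
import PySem

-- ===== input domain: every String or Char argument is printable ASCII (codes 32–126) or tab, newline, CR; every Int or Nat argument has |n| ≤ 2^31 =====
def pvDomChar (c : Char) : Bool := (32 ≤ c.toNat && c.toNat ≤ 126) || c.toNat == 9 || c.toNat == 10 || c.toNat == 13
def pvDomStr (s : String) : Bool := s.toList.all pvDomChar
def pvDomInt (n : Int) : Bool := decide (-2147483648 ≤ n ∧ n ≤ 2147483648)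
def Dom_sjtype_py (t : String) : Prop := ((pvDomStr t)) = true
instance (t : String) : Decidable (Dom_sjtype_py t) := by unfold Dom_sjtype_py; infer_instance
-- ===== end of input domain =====

-- ===== PORT A =====
-- header: B converts the same Smali type string iteratively (count leading '[' once) instead of A's recursion; alternative decomposition, same cost class.
-- the module-level dict _SMALI_TO_JAVA_ICC, keys/values as Char lists
def iccDict : PySem.Dict (List Char) (List Char) :=
  PySem.Dict.ofList [("V".toList, "void".toList), ("Z".toList, "boolean".toList),
    ("B".toList, "byte".toList), ("C".toList, "char".toList), ("S".toList, "short".toList),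
    ("I".toList, "int".toList), ("J".toList, "long".toList), ("F".toList, "float".toList),
    ("D".toList, "double".toList)]

-- literal recursion of A on the code-point list: dict check, then '[' branch on t[1:] (= drop 1), then L...; branch (t[1:-1] = (drop 1).dropLast, exact), else identity
def sjtypeA_core (cs : List Char) : List Char :=
  match iccDict.get? cs with
  | some v => v
  | none =>
    if h : PySem.Chars.startswith cs ['['] then
      sjtypeA_core (cs.drop 1) ++ ['[', ']']
    else if PySem.Chars.startswith cs ['L'] && PySem.Chars.endswith cs [';'] then
      PySem.Chars.replace ((cs.drop 1).dropLast) ['/'] ['.']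
    else
      cs
termination_by cs.length
decreasing_by
  have hne : cs ≠ [] := by
    intro hnil
    rw [hnil] at h
    simp [PySem.Chars.startswith_iff] at h
  cases cs with
  | nil => exact absurd rfl hne
  | cons c rest => simp

def sjtype_py (t : String) : String := String.ofList (sjtypeA_core t.toList)

-- ===== PORT B =====
-- base-type conversion applied once to the bracket-stripped remainder (dict .get, then L...;, else identity)
def sjtypeB_base (base : List Char) : List Char :=
  match iccDict.get? base with
  | some v => v
  | none =>
    if PySem.Chars.startswith base ['L'] && PySem.Chars.endswith base [';'] then
      PySem.Chars.replace ((base.drop 1).dropLast) ['/'] ['.']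
    else
      base

-- n = len(t) - len(t.lstrip("[")); t.lstrip("[") is ported by hand as dropWhile (== '[') — exact for a single strip char
def sjtypeB_core (cs : List Char) : List Char :=
  let n := cs.length - (cs.dropWhile (· == '[')).length
  sjtypeB_base (cs.drop n) ++ (List.replicate n ['[', ']']).flatten

def sjtype_py_alt (t : String) : String := String.ofList (sjtypeB_core t.toList)

-- ===== PRECONDITION & SPEC =====
def Spec_sjtype_py (t : String) (out : String) : Prop := out = sjtype_py_alt t
instance (t : String) (out : String) : Decidable (Spec_sjtype_py t out) := by unfold Spec_sjtype_py; infer_instance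

-- ===== CLAIM (what is proved, stated in full; the proofs are below) =====
def Claim_equal_sjtype_py : Prop := ∀ (t : String), Dom_sjtype_py t → Spec_sjtype_py t (sjtype_py t)

-- ===== LEMMAS AND PROOFS =====

-- ===== VERDICT (by name: the statement is the Claim_ definition above) =====
-- no dict key starts with '[' (all keys are single primitive-type letters)
lemma iccDict_get?_bracket (rest : List Char) : iccDict.get? ('[' :: rest) = none := by
  have h : iccDict = PySem.Dict.mk [("V".toList, "void".toList), ("Z".toList, "boolean".toList),
    ("B".toList, "byte".toList), ("C".toList, "char".toList), ("S".toList, "short".toList),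
    ("I".toList, "int".toList), ("J".toList, "long".toList), ("F".toList, "float".toList),
    ("D".toList, "double".toList)] := by decide
  rw [h]
  simp [PySem.Dict.get?]

-- on a string not starting with '[', A's recursion takes no step and agrees with B's base conversion
lemma core_eq_base (cs : List Char) (h : ¬ PySem.Chars.startswith cs ['[']) :
    sjtypeA_core cs = sjtypeB_base cs := by
  rw [sjtypeA_core, sjtypeB_base]
  cases iccDict.get? cs with
  | some v => rfl
  | none => simp [h]

lemma core_eq (cs : List Char) : sjtypeA_core cs = sjtypeB_core cs := by
  induction cs with
  | nil =>
    rw [sjtypeB_core]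
    simpa using core_eq_base [] (by simp [PySem.Chars.startswith_iff])
  | cons c rest ih =>
    by_cases hc : c = '['
    · subst hc
      rw [sjtypeA_core, iccDict_get?_bracket]
      have hsw : PySem.Chars.startswith ('[' :: rest) ['['] := by
        simp [PySem.Chars.startswith_iff]
      simp only [hsw, dite_true, List.drop_one, List.tail_cons]
      rw [ih, sjtypeB_core, sjtypeB_core]
      have hle : (rest.dropWhile (· == '[')).length ≤ rest.length :=
        List.length_dropWhile_le _ _
      have hdw : ('[' :: rest).dropWhile (· == '[') = rest.dropWhile (· == '[') := by
        simp
      rw [hdw]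
      have hn : ('[' :: rest).length - (rest.dropWhile (· == '[')).length
          = (rest.length - (rest.dropWhile (· == '[')).length) + 1 := by
        simp only [List.length_cons]; omega
      rw [hn]
      simp only [List.drop_succ_cons, List.replicate_succ', List.flatten_append,
        List.flatten_cons, List.flatten_nil, List.append_nil, List.append_assoc]
    · have hsw : ¬ PySem.Chars.startswith (c :: rest) ['['] := by
        simp only [PySem.Chars.startswith_iff, List.cons_prefix_cons]
        exact fun h => hc h.1.symm
      rw [core_eq_base _ hsw, sjtypeB_core]
      have hdw : (c :: rest).dropWhile (· == '[') = c :: rest := by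
        simp [hc]
      rw [hdw]
      simp

theorem sjtype_py_spec : Claim_equal_sjtype_py := by
  intro t _
  unfold Spec_sjtype_py sjtype_py sjtype_py_alt
  rw [core_eq]
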